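-- pv_equiv track=rewrite | github.com/varioustoxins/ccpn_nef | src/ccpn_nef/GenericStarParser.py | extractMatchingNameSequence
-- ===== SOURCE A (Python) =====
-- def extractMatchingNameSequence(name, matchNames):
--     """Get list of matchNames matching 'name_1', 'name_2', ..., in order."""
--
--     ll = []
--     for tag in matchNames:
--         tt = tag.rsplit('_', 1)
--         if name == tt[0] and tt[-1].isdigit():
--             ll.append((int(tt[1]), tag))
--     ll.sort()
--
--     if [tt[0] for tt in ll] == list(range(1, len(ll) + 1)):
--         return [tt[1] for tt in ll]
--     else:
--         return None
-- ===== SOURCE B (Python) =====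
-- def extractMatchingNameSequence(name, matchNames):
--     """Get list of matchNames matching 'name_1', 'name_2', ..., in order."""
--
--     # One pass to collect (index, tag) pairs, then bucket-place each tag into a
--     # slot array of the right size; a gap, duplicate or out-of-range index is
--     # detected on the fly, so no sort is needed.
--     pairs = []
--     for tag in matchNames:
--         head, sep, idx = tag.rpartition('_')
--         if sep and head == name and idx.isdigit():
--             pairs.append((int(idx), tag))
--     n = len(pairs)
--     slots = [None] * n
--     for i, tag in pairs:
--         if i < 1 or i > n or slots[i - 1] is not None:
--             return None
--         slots[i - 1] = tag
--     return slots
-- ===== Notes on version B (the rewrite author's own statement) =====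
-- stated objective: faster
-- what changed: Instead of collecting (index, tag) pairs, sorting them and comparing the index column with range(1, n+1), B bucket-places each matching tag into a slot array of size n in one pass, rejecting on an out-of-range or duplicate index, so the sort disappears.
import Mathlib
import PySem

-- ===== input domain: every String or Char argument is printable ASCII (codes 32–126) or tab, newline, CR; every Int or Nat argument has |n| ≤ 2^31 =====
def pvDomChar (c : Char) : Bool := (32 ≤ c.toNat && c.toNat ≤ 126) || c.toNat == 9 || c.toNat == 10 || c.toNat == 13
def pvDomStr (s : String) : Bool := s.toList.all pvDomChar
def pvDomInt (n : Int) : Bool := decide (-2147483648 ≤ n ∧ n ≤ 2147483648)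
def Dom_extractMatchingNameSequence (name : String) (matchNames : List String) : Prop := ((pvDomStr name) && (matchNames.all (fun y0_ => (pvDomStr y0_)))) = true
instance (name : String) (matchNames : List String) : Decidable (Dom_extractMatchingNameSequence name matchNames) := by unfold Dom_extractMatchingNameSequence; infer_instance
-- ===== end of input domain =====

-- ===== PORT A =====
-- B is a one-pass bucket placement instead of A's sort-and-compare; equivalence is
-- proved on Pre_ (A raises IndexError when name is a digit string occurring in matchNames).

-- hand-port primitive shared by both ports: split cs at its LAST '_' into (before, after);
-- none exactly when cs has no '_'.  Exact for Python's tag.rsplit('_', 1) (two pieces) and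
-- tag.rpartition('_') (sep nonempty).
def pvLastSplitU : List Char → Option (List Char × List Char)
  | [] => none
  | c :: rest =>
    match pvLastSplitU rest with
    | some (a, b) => some (c :: a, b)
    | none => if c = '_' then some ([], rest) else none

-- tag.rsplit('_', 1): exact (list of 1 or 2 pieces)
def pvRsplitU1 (cs : List Char) : List (List Char) :=
  match pvLastSplitU cs with
  | some (a, b) => [a, b]
  | none => [cs]

-- the body of A's first loop
def pvStepA (name : String) (acc : List (Int × String)) (tag : String) : List (Int × String) :=
  let tt := pvRsplitU1 tag.toList
  if name.toList = PySem.List.pyGetD tt 0 [] ∧ PySem.Chars.strIsdigit (PySem.List.pyGetD tt (-1) []) = true then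
    -- int(tt[1]): tt[1] raises IndexError when tt has a single piece — those inputs are outside Pre_;
    -- inside the branch tt[1] is a nonempty digit string, so ofChars? is `some` and getD is exact
    acc ++ [(((PySem.Int.ofChars? (PySem.List.pyGetD tt 1 [])).getD 0), tag)]
  else acc

def extractMatchingNameSequence (name : String) (matchNames : List String) : Option (List String) :=
  let ll := matchNames.foldl (pvStepA name) []
  let lls := PySem.List.sorted2 ll (fun p => p.1) (fun p => p.2) false
  if lls.map (fun p => p.1) = PySem.List.pyRange 1 ((ll.length : Int) + 1) then
    some (lls.map (fun p => p.2))
  else none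

-- ===== PORT B =====
-- the body of B's first loop (rpartition-based filter)
def pvStepB (name : String) (acc : List (Int × String)) (tag : String) : List (Int × String) :=
  match pvLastSplitU tag.toList with
  | some (head, idx) =>
    if head = name.toList ∧ PySem.Chars.strIsdigit idx = true then
      acc ++ [(((PySem.Int.ofChars? idx).getD 0), tag)]   -- int(idx): idx is a nonempty digit string here
    else acc
  | none => acc

-- B's second loop: place each tag into slot i-1, rejecting out-of-range / occupied
def pvBGo (n : Int) : List (Int × String) → List (Option String) → Option (List String)
  | [], slots => some (slots.map (fun o => o.getD ""))
  | (i, t) :: rest, slots =>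
    if i < 1 ∨ n < i ∨ (PySem.List.pyGetD slots (i - 1) none).isSome = true then none
    else pvBGo n rest (PySem.List.pySetD slots (i - 1) (some t))

def extractMatchingNameSequence_alt (name : String) (matchNames : List String) : Option (List String) :=
  let pairs := matchNames.foldl (pvStepB name) []
  pvBGo (pairs.length : Int) pairs (List.replicate pairs.length none)

-- ===== PRECONDITION & SPEC =====
-- Pre_ excludes exactly the inputs where A raises IndexError: name itself a digit string
-- occurring verbatim in matchNames (rsplit then yields one piece but A reads tt[1]).
def Pre_extractMatchingNameSequence (name : String) (matchNames : List String) : Prop :=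
  ¬ (PySem.Chars.strIsdigit name.toList = true ∧ name ∈ matchNames)
instance (name : String) (matchNames : List String) : Decidable (Pre_extractMatchingNameSequence name matchNames) := by unfold Pre_extractMatchingNameSequence; infer_instance

def pvWitness_extractMatchingNameSequence : String × List String := ("a", ["a_2", "a_1"])

def Spec_extractMatchingNameSequence (name : String) (matchNames : List String) (out : Option (List String)) : Prop := out = extractMatchingNameSequence_alt name matchNames
instance (name : String) (matchNames : List String) (out : Option (List String)) : Decidable (Spec_extractMatchingNameSequence name matchNames out) := by unfold Spec_extractMatchingNameSequence; infer_instance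

-- ===== CLAIM (what is proved, stated in full; the proofs are below) =====
def Claim_equal_extractMatchingNameSequence : Prop := ∀ (name : String) (matchNames : List String), Dom_extractMatchingNameSequence name matchNames → Pre_extractMatchingNameSequence name matchNames → Spec_extractMatchingNameSequence name matchNames (extractMatchingNameSequence name matchNames)

-- ===== LEMMAS AND PROOFS =====

-- pvK ps: the condition under which both programs succeed — the collected indices are
-- pairwise distinct and lie in 1..n (hence are exactly the indices 1..n).
def pvK (ps : List (Int × String)) : Prop :=
  (ps.map Prod.fst).Nodup ∧ ∀ p ∈ ps, 1 ≤ p.1 ∧ p.1 ≤ (ps.length : Int)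

def pvTag (ps : List (Int × String)) (j : Nat) : String :=
  (((ps.find? (fun p => p.1 == (j : Int) + 1)).map Prod.snd).getD "")

def pvC (ps : List (Int × String)) : List (Int × String) :=
  (List.range ps.length).map (fun (j : Nat) => ((j : Int) + 1, pvTag ps j))

lemma pv_range_cast (n : Nat) :
    PySem.List.pyRange 1 ((n : Int) + 1) = (List.range n).map (fun (j : Nat) => (j : Int) + 1) := by
  induction n with
  | zero => decide
  | succ n ih =>
    have h1 : ((n + 1 : Nat) : Int) + 1 = ((n : Int) + 1) + 1 := by push_cast; ring
    rw [h1, PySem.List.pyRange_one_succ_right (by omega), ih, List.range_succ]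
    simp

lemma pv_insertBy_congr {α : Type} (b b' : α → α → Bool) (x : α) (ys : List α)
    (h : ∀ y ∈ ys, b x y = b' x y) : PySem.List.insertBy b x ys = PySem.List.insertBy b' x ys := by
  induction ys with
  | nil => rfl
  | cons y ys ih =>
    simp only [PySem.List.insertBy]
    rw [h y (List.mem_cons_self ..)]
    split
    · rfl
    · rw [ih (fun z hz => h z (List.mem_cons_of_mem _ hz))]

lemma pv_foldl_insertBy_congr {α : Type} (b b' : α → α → Bool) (xs acc : List α)
    (h : ∀ a b₂, (a ∈ xs ∨ a ∈ acc) → (b₂ ∈ xs ∨ b₂ ∈ acc) → b a b₂ = b' a b₂) :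
    xs.foldl (fun acc x => PySem.List.insertBy b x acc) acc
      = xs.foldl (fun acc x => PySem.List.insertBy b' x acc) acc := by
  induction xs generalizing acc with
  | nil => rfl
  | cons x xs ih =>
    simp only [List.foldl_cons]
    rw [pv_insertBy_congr b b' x acc (fun y hy => h x y (Or.inl (List.mem_cons_self ..)) (Or.inr hy))]
    exact ih _ (fun a c ha hc =>
      h a c
        (ha.elim (fun h1 => Or.inl (List.mem_cons_of_mem _ h1))
          (fun h1 => ((PySem.List.mem_insertBy _ _ _ _).mp h1).elim
            (fun h2 => Or.inl (h2 ▸ List.mem_cons_self ..)) Or.inr))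
        (hc.elim (fun h1 => Or.inl (List.mem_cons_of_mem _ h1))
          (fun h1 => ((PySem.List.mem_insertBy _ _ _ _).mp h1).elim
            (fun h2 => Or.inl (h2 ▸ List.mem_cons_self ..)) Or.inr)))

lemma pv_mem_fst_unique (ps : List (Int × String)) (hnd : (ps.map Prod.fst).Nodup)
    {p q : Int × String} (hp : p ∈ ps) (hq : q ∈ ps) (h : p.1 = q.1) : p = q := by
  exact List.inj_on_of_nodup_map hnd hp hq h

lemma pv_sorted2_eq_sorted_fst (ps : List (Int × String)) (hnd : (ps.map Prod.fst).Nodup) :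
    PySem.List.sorted2 ps (fun p => p.1) (fun p => p.2) false
      = PySem.List.sorted ps (fun p => p.1) false := by
  simp only [PySem.List.sorted2, PySem.List.sorted, if_neg (by decide : ¬ (false = true))]
  apply pv_foldl_insertBy_congr
  intro a b ha hb
  have ha' : a ∈ ps := ha.elim id (by simp)
  have hb' : b ∈ ps := hb.elim id (by simp)
  rcases lt_trichotomy a.1 b.1 with h | h | h
  · simp [h]
  · have : a = b := pv_mem_fst_unique ps hnd ha' hb' h
    subst this
    simp
  · simp [h, not_lt_of_gt h]

lemma pv_keys_perm (ps : List (Int × String)) (hK : pvK ps) :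
    (ps.map Prod.fst).Perm ((List.range ps.length).map (fun (j : Nat) => (j : Int) + 1)) := by
  apply List.Subperm.perm_of_length_le
  · apply hK.1.subperm
    intro x hx
    obtain ⟨p, hp, rfl⟩ := List.mem_map.mp hx
    obtain ⟨h1, h2⟩ := hK.2 p hp
    refine List.mem_map.mpr ⟨(p.1 - 1).toNat, List.mem_range.mpr (by omega), by omega⟩
  · simp

lemma pv_find_spec (ps : List (Int × String)) (hK : pvK ps) (j : Nat) (hj : j < ps.length) :
    ((j : Int) + 1, pvTag ps j) ∈ ps := by
  have hmem : ((j : Int) + 1) ∈ ps.map Prod.fst := by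
    refine (pv_keys_perm ps hK).mem_iff.mpr ?_
    exact List.mem_map.mpr ⟨j, List.mem_range.mpr hj, rfl⟩
  obtain ⟨p, hp, hfst⟩ := List.mem_map.mp hmem
  have hsome : (ps.find? (fun p => p.1 == (j : Int) + 1)).isSome := by
    exact List.find?_isSome.mpr ⟨p, hp, by simp [hfst]⟩
  obtain ⟨q, hq⟩ := Option.isSome_iff_exists.mp hsome
  have hq1 : q.1 = (j : Int) + 1 := by simpa using List.find?_some hq
  have hqmem : q ∈ ps := List.mem_of_find?_eq_some hq
  have : pvTag ps j = q.2 := by simp [pvTag, hq]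
  rw [this, ← hq1]
  exact hqmem


lemma pv_C_perm (ps : List (Int × String)) (hK : pvK ps) : (pvC ps).Perm ps := by
  apply List.Subperm.perm_of_length_le
  · apply List.Nodup.subperm
    · apply List.Nodup.map ?_ (List.nodup_range)
      intro j j' hjj
      have : (j : Int) + 1 = (j' : Int) + 1 := congrArg Prod.fst hjj
      omega
    · intro x hx
      obtain ⟨j, hj, rfl⟩ := List.mem_map.mp hx
      exact pv_find_spec ps hK j (List.mem_range.mp hj)
  · simp [pvC]

lemma pv_sorted2_eq_C (ps : List (Int × String)) (hK : pvK ps) :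
    PySem.List.sorted2 ps (fun p => p.1) (fun p => p.2) false = pvC ps := by
  rw [pv_sorted2_eq_sorted_fst ps hK.1]
  apply PySem.List.sorted_eq_of_perm_of_pairwise_lt ps (pvC ps) (fun p => p.1) (pv_C_perm ps hK)
  unfold pvC
  rw [List.pairwise_map]
  exact List.pairwise_lt_range.imp (by intro a b h; simpa using by omega)

lemma pv_foldl_set_length (ps : List (Int × String)) (slots : List (Option String)) :
    (ps.foldl (fun s p => s.set (p.1 - 1).toNat (some p.2)) slots).length = slots.length := by
  induction ps generalizing slots with
  | nil => rfl
  | cons p ps ih => rw [List.foldl_cons, ih, List.length_set]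

-- B fold: characterize the final slot array
lemma pv_foldl_set_getElem (ps : List (Int × String)) :
    ∀ (slots : List (Option String)), (ps.map Prod.fst).Nodup →
    (∀ p ∈ ps, 1 ≤ p.1 ∧ p.1 ≤ (slots.length : Int)) →
    ∀ (j : Nat) (hj : j < (ps.foldl (fun s p => s.set (p.1 - 1).toNat (some p.2)) slots).length),
    (ps.foldl (fun s p => s.set (p.1 - 1).toNat (some p.2)) slots)[j]'hj
      = ((ps.find? (fun p => p.1 == (j : Int) + 1)).map (fun p => some p.2)).getD (slots.getD j none) := by
  induction ps with
  | nil =>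
    intro slots _ _ j hj
    simp only [List.foldl_nil, List.find?_nil, Option.map_none, Option.getD_none]
    rw [List.getD_eq_getElem slots none (by simpa using hj)]
  | cons p ps ih =>
    intro slots hnd hb j hj
    have hj' : j < slots.length := by
      have := pv_foldl_set_length (p :: ps) slots; omega
    rw [List.map_cons] at hnd
    obtain ⟨hnd1, hnd2⟩ := List.nodup_cons.mp hnd
    have hb1 := hb p (List.mem_cons_self ..)
    have hbt : ∀ q ∈ ps, 1 ≤ q.1 ∧ q.1 ≤ ((slots.set (p.1 - 1).toNat (some p.2)).length : Int) := by
      intro q hq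
      have := hb q (List.mem_cons_of_mem _ hq); simpa using this
    have hjt : j < (ps.foldl (fun s q => s.set (q.1 - 1).toNat (some q.2))
        (slots.set (p.1 - 1).toNat (some p.2))).length := by
      rw [pv_foldl_set_length]; simpa using hj'
    by_cases hpj : p.1 = (j : Int) + 1
    · rw [List.find?_cons_of_pos (by simp [hpj])]
      simp only [List.foldl_cons, Option.map_some, Option.getD_some]
      have hfind : ps.find? (fun q => q.1 == (j : Int) + 1) = none := by
        rw [List.find?_eq_none]
        intro q hq
        simp only [beq_iff_eq]
        intro hq1
        exact hnd1 (List.mem_map.mpr ⟨q, hq, hq1.trans hpj.symm⟩)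
      rw [ih _ hnd2 hbt j hjt, hfind]
      simp only [Option.map_none, Option.getD_none]
      have hidx : (p.1 - 1).toNat = j := by omega
      rw [hidx, List.getD_eq_getElem _ none (by simpa using hj'), List.getElem_set_self]
    · rw [List.find?_cons_of_neg (by simp [hpj])]
      simp only [List.foldl_cons]
      rw [ih _ hnd2 hbt j hjt]
      have hidx : (p.1 - 1).toNat ≠ j := by omega
      have : (slots.set (p.1 - 1).toNat (some p.2)).getD j none = slots.getD j none := by
        rw [List.getD_eq_getElem?_getD, List.getD_eq_getElem?_getD, List.getElem?_set_ne hidx]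
      rw [this]

lemma pv_bGo_success (n : Int) (rest : List (Int × String)) :
    ∀ (slots : List (Option String)), n = (slots.length : Int) →
    (rest.map Prod.fst).Nodup →
    (∀ p ∈ rest, 1 ≤ p.1 ∧ p.1 ≤ n) →
    (∀ p ∈ rest, slots.getD (p.1 - 1).toNat none = none) →
    pvBGo n rest slots
      = some ((rest.foldl (fun s p => s.set (p.1 - 1).toNat (some p.2)) slots).map (fun o => o.getD "")) := by
  induction rest with
  | nil => intro slots _ _ _ _; rfl
  | cons p rest ih =>
    intro slots hn hnd hb he
    obtain ⟨i, t⟩ := p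
    obtain ⟨hi1, hi2⟩ := hb (i, t) (List.mem_cons_self ..)
    rw [List.map_cons] at hnd
    obtain ⟨hnd1, hnd2⟩ := List.nodup_cons.mp hnd
    have hpg : PySem.List.pyGetD slots (i - 1) none = none := by
      rw [PySem.List.pyGetD_of_nonneg slots none (by omega)]
      exact he (i, t) (List.mem_cons_self ..)
    simp only [pvBGo]
    rw [if_neg (by simp [hpg]; omega)]
    rw [PySem.List.pySetD_of_nonneg slots (some t) (by omega)]
    exact ih (slots.set (i - 1).toNat (some t))
      (by simpa using hn) hnd2
      (fun q hq => hb q (List.mem_cons_of_mem _ hq))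
      (fun q hq => by
        obtain ⟨hq1, hq2⟩ := hb q (List.mem_cons_of_mem _ hq)
        have hqi : q.1 ≠ i := fun hqe => hnd1 (List.mem_map.mpr ⟨q, hq, hqe⟩)
        have hne : (q.1 - 1).toNat ≠ (i - 1).toNat := by omega
        rw [List.getD_eq_getElem?_getD, List.getElem?_set_ne (hne ∘ Eq.symm), ← List.getD_eq_getElem?_getD]
        exact he q (List.mem_cons_of_mem _ hq))

lemma pv_bGo_some_K (n : Int) (rest : List (Int × String)) :
    ∀ (slots : List (Option String)), n = (slots.length : Int) →
    ∀ (l : List String), pvBGo n rest slots = some l →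
    (rest.map Prod.fst).Nodup ∧ ∀ p ∈ rest, 1 ≤ p.1 ∧ p.1 ≤ n ∧ slots.getD (p.1 - 1).toNat none = none := by
  induction rest with
  | nil => intro slots _ l _; exact ⟨List.nodup_nil, by simp⟩
  | cons p rest ih =>
    intro slots hn l h
    obtain ⟨i, t⟩ := p
    simp only [pvBGo] at h
    by_cases hg : i < 1 ∨ n < i ∨ (PySem.List.pyGetD slots (i - 1) none).isSome = true
    · rw [if_pos hg] at h; exact absurd h (by simp)
    · rw [if_neg hg] at h
      push Not at hg
      obtain ⟨hi1, hi2, hi3⟩ := hg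
      have hi1 : 1 ≤ i := by omega
      have hge : slots.getD (i - 1).toNat none = none := by
        rw [PySem.List.pyGetD_of_nonneg slots (none (α := String)) (i := i - 1) (by omega)] at hi3
        cases hcase : slots.getD (i - 1).toNat none with
        | none => rfl
        | some v => rw [hcase] at hi3; simp at hi3
      rw [PySem.List.pySetD_of_nonneg slots (some t) (by omega)] at h
      obtain ⟨ihnd, ihp⟩ := ih (slots.set (i - 1).toNat (some t)) (by simpa using hn) l h
      have hlen : (i - 1).toNat < slots.length := by omega
      have hni : ∀ q ∈ rest, q.1 ≠ i := by
        intro q hq hqe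
        obtain ⟨_, _, hqn⟩ := ihp q hq
        rw [hqe, List.getD_eq_getElem _ none (by simpa using hlen), List.getElem_set_self] at hqn
        exact absurd hqn (by simp)
      refine ⟨List.nodup_cons.mpr ⟨fun hmem => ?_, ihnd⟩, ?_⟩
      · obtain ⟨q, hq, hqe⟩ := List.mem_map.mp hmem
        exact hni q hq hqe
      · intro q hq
        rcases List.mem_cons.mp hq with rfl | hq'
        · exact ⟨hi1, hi2, hge⟩
        · obtain ⟨h1, h2, h3⟩ := ihp q hq'
          refine ⟨h1, h2, ?_⟩
          have hne : (q.1 - 1).toNat ≠ (i - 1).toNat := by have := hni q hq'; omega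
          rw [List.getD_eq_getElem?_getD, ← List.getElem?_set_ne (hne ∘ Eq.symm) (a := some t), ← List.getD_eq_getElem?_getD]
          exact h3

lemma pv_phase2 (ps : List (Int × String)) :
    (if (PySem.List.sorted2 ps (fun p => p.1) (fun p => p.2) false).map (fun p => p.1)
        = PySem.List.pyRange 1 ((ps.length : Int) + 1) then
       some ((PySem.List.sorted2 ps (fun p => p.1) (fun p => p.2) false).map (fun p => p.2))
     else none)
    = pvBGo (ps.length : Int) ps (List.replicate ps.length none) := by
  have hrange := pv_range_cast ps.length
  by_cases hK : pvK ps
  · -- both succeed with the same list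
    have hC := pv_sorted2_eq_C ps hK
    have hmapfst : (pvC ps).map (fun p => p.1)
        = (List.range ps.length).map (fun (j : Nat) => (j : Int) + 1) := by
      simp [pvC, List.map_map, Function.comp]
    have hb : ∀ p ∈ ps, 1 ≤ p.1 ∧ p.1 ≤ ((List.replicate ps.length (none : Option String)).length : Int) := by
      simpa using hK.2
    have hrep : ∀ p ∈ ps, (List.replicate ps.length (none : Option String)).getD (p.1 - 1).toNat none = none := by
      intro p _
      rw [List.getD_eq_getElem?_getD, List.getElem?_replicate]
      split <;> rfl
    have hsucc := pv_bGo_success (ps.length : Int) ps (List.replicate ps.length none)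
      (by simp) hK.1 (by simpa using hK.2) hrep
    have hlen : (ps.foldl (fun s p => s.set (p.1 - 1).toNat (some p.2))
        (List.replicate ps.length none)).length = ps.length := by
      rw [pv_foldl_set_length]; simp
    have hfold : (ps.foldl (fun s p => s.set (p.1 - 1).toNat (some p.2))
          (List.replicate ps.length (none : Option String))).map (fun o => o.getD "")
        = (List.range ps.length).map (pvTag ps) := by
      apply List.ext_getElem
      · simp only [List.length_map, List.length_range]; exact hlen
      · intro j h1 h2
        have hj : j < ps.length := by simpa using h2
        have hjf : j < (ps.foldl (fun s p => s.set (p.1 - 1).toNat (some p.2))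
            (List.replicate ps.length (none : Option String))).length := by rw [hlen]; exact hj
        rw [List.getElem_map, List.getElem_map, List.getElem_range]
        rw [pv_foldl_set_getElem ps _ hK.1 hb j hjf]
        have hmem := pv_find_spec ps hK j hj
        have hsome : (ps.find? (fun p => p.1 == (j : Int) + 1)).isSome := by
          exact List.find?_isSome.mpr ⟨_, hmem, by simp⟩
        obtain ⟨q, hq⟩ := Option.isSome_iff_exists.mp hsome
        have : pvTag ps j = q.2 := by simp [pvTag, hq]
        rw [hq, this]
        rfl
    rw [hC, hmapfst, hrange, if_pos rfl, hsucc, hfold]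
    simp [pvC, List.map_map, Function.comp]
  · -- both fail
    have hA : ¬ ((PySem.List.sorted2 ps (fun p => p.1) (fun p => p.2) false).map (fun p => p.1)
        = PySem.List.pyRange 1 ((ps.length : Int) + 1)) := by
      intro hcond
      apply hK
      have hperm : (ps.map Prod.fst).Perm ((List.range ps.length).map (fun (j : Nat) => (j : Int) + 1)) := by
        have h1 : ((PySem.List.sorted2 ps (fun p => p.1) (fun p => p.2) false).map (fun p => p.1)).Perm
            (ps.map Prod.fst) := (PySem.List.sorted2_perm ps _ _ false).map _
        rw [hcond, hrange] at h1
        exact h1.symm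
      have hndR : ((List.range ps.length).map (fun (j : Nat) => (j : Int) + 1)).Nodup := by
        apply List.Nodup.map ?_ List.nodup_range
        intro a b hab
        have : (a : Int) + 1 = (b : Int) + 1 := hab
        omega
      refine ⟨hperm.nodup_iff.mpr hndR, ?_⟩
      intro p hp
      have : p.1 ∈ (List.range ps.length).map (fun (j : Nat) => (j : Int) + 1) :=
        hperm.mem_iff.mp (List.mem_map.mpr ⟨p, hp, rfl⟩)
      obtain ⟨j, hj, hje⟩ := List.mem_map.mp this
      have := List.mem_range.mp hj
      omega
    rw [if_neg hA]
    cases hB : pvBGo (ps.length : Int) ps (List.replicate ps.length none) with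
    | none => rfl
    | some l =>
      exfalso
      apply hK
      obtain ⟨hnd, hp⟩ := pv_bGo_some_K (ps.length : Int) ps (List.replicate ps.length none)
        (by simp) l hB
      exact ⟨hnd, fun p hpm => ⟨(hp p hpm).1, (hp p hpm).2.1⟩⟩

lemma pv_stepA_eq_stepB (name tag : String) (acc : List (Int × String))
    (h : ¬ (name = tag ∧ PySem.Chars.strIsdigit tag.toList = true)) :
    pvStepA name acc tag = pvStepB name acc tag := by
  unfold pvStepA pvStepB pvRsplitU1
  cases hsp : pvLastSplitU tag.toList with
  | none =>
    simp only []
    rw [if_neg]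
    intro ⟨h1, h2⟩
    have h0 : PySem.List.pyGetD [tag.toList] 0 ([] : List Char) = tag.toList := by
      simp [PySem.List.pyGetD, PySem.List.pyGet?, PySem.List.pyIdx?]
    have hm1 : PySem.List.pyGetD [tag.toList] (-1) ([] : List Char) = tag.toList := by
      simp [PySem.List.pyGetD, PySem.List.pyGet?, PySem.List.pyIdx?]
    rw [h0] at h1
    rw [hm1] at h2
    exact h ⟨String.toList_inj.mp h1, h2⟩
  | some ab =>
    obtain ⟨a, b⟩ := ab
    simp only []
    have h0 : PySem.List.pyGetD [a, b] 0 ([] : List Char) = a := by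
      simp [PySem.List.pyGetD, PySem.List.pyGet?, PySem.List.pyIdx?]
    have hm1 : PySem.List.pyGetD [a, b] (-1) ([] : List Char) = b := by
      simp [PySem.List.pyGetD, PySem.List.pyGet?, PySem.List.pyIdx?]
    have h1 : PySem.List.pyGetD [a, b] 1 ([] : List Char) = b := by
      simp [PySem.List.pyGetD, PySem.List.pyGet?, PySem.List.pyIdx?]
    rw [h0, hm1, h1]
    by_cases hc : name.toList = a ∧ PySem.Chars.strIsdigit b = true
    · rw [if_pos hc, if_pos ⟨hc.1.symm, hc.2⟩]
    · rw [if_neg hc, if_neg (fun hc' => hc ⟨hc'.1.symm, hc'.2⟩)]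

lemma pv_pairs_eq (name : String) (matchNames : List String)
    (hpre : Pre_extractMatchingNameSequence name matchNames) :
    matchNames.foldl (pvStepA name) [] = matchNames.foldl (pvStepB name) [] := by
  have hall : ∀ tag ∈ matchNames, ¬ (name = tag ∧ PySem.Chars.strIsdigit tag.toList = true) := by
    rintro tag htag ⟨rfl, hd⟩
    exact hpre ⟨hd, htag⟩
  suffices haux : ∀ (ms : List String) (acc : List (Int × String)),
      (∀ tag ∈ ms, ¬ (name = tag ∧ PySem.Chars.strIsdigit tag.toList = true)) →
      ms.foldl (pvStepA name) acc = ms.foldl (pvStepB name) acc from haux matchNames [] hall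
  intro ms
  induction ms with
  | nil => intro acc _; rfl
  | cons tag ms ih =>
    intro acc hms
    rw [List.foldl_cons, List.foldl_cons,
      pv_stepA_eq_stepB name tag acc (hms tag (List.mem_cons_self ..)),
      ih _ (fun t ht => hms t (List.mem_cons_of_mem _ ht))]

-- ===== VERDICT (by name: the statement is the Claim_ definition above) =====
theorem extractMatchingNameSequence_spec : Claim_equal_extractMatchingNameSequence := by
  intro name matchNames _hdom hpre
  unfold Spec_extractMatchingNameSequence extractMatchingNameSequence extractMatchingNameSequence_alt
  rw [pv_pairs_eq name matchNames hpre]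
  exact pv_phase2 _
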